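-- pv_equiv track=rewrite | github.com/burcuyesilyurt/vrp_cifo | CIFO2024/charles/xo_utils.py | reconstruct_routes
-- ===== SOURCE A (Python) =====
-- def reconstruct_routes(flat_offspring):
--     """
--     Reconstructs an individual's representation from a flattened array back to a 2D-array.
--
--     Args:
--         flat_offspring (list): The flattened representation as a 1D-array.
--
--     Returns:
--         list: The reconstructed representation as a 2D-array.
--     """
--     offspring = []
--
--     current_route = []
--     for i in flat_offspring:
--         if i == 0:
--             offspring.append(current_route)
--             current_route = []
--         else:
--             current_route.append(i)
--
--     return offspring
-- ===== SOURCE B (Python) =====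
-- def reconstruct_routes(flat_offspring):
--     """Reconstruct routes by repeatedly slicing off everything before the next 0."""
--     routes = []
--     rest = flat_offspring
--     while 0 in rest:
--         k = rest.index(0)
--         routes.append(rest[:k])
--         rest = rest[k + 1:]
--     return routes
-- ===== Notes on version B (the rewrite author's own statement) =====
-- stated objective: alternative
-- what changed: B replaces A's element-by-element accumulation into a current_route buffer with a while loop that finds the next 0 via list.index and slices off the whole route at once, shrinking the remaining list each step.
import Mathlib
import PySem

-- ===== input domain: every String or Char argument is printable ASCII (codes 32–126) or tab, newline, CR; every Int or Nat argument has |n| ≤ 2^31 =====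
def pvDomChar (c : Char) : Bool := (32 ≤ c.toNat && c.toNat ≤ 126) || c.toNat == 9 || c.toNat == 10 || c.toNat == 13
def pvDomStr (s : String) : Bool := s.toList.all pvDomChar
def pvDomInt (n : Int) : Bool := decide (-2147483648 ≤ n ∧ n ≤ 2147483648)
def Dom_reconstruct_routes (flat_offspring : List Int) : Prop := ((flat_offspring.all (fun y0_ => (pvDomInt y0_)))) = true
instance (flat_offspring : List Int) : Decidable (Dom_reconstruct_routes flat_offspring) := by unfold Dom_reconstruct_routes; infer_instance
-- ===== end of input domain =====

-- B is an alternative decomposition: a while loop that slices off whole routes at the next 0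
-- found by list.index, instead of A's element-by-element accumulation.  Return values only.

-- ===== PORT A =====
-- the body of A's for-loop (if i == 0: append current_route, reset; else: extend current_route)
def aStep (s : List (List Int) × List Int) (i : Int) : List (List Int) × List Int :=
  if i = 0 then (s.1 ++ [s.2], []) else (s.1, s.2 ++ [i])

def reconstruct_routes (flat_offspring : List Int) : List (List Int) :=
  (flat_offspring.foldl aStep ([], [])).1

-- ===== PORT B =====
-- termination helper for the while loop: rest becomes strictly shorter
theorem pvSliceShrink (rest : List Int) (k : Nat) (h : (0:Int) ∈ rest) :
    (PySem.List.slice rest (some ((k:Int) + 1)) none).length < rest.length := by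
  have hc : ((k:Int) + 1) = (((k+1 : Nat) : Int)) := by push_cast; ring
  rw [hc, PySem.List.slice_from_natCast]
  have : rest ≠ [] := by rintro rfl; simp at h
  have : 0 < rest.length := List.length_pos_iff.mpr this
  simp [List.length_drop]; omega

def altLoop (routes : List (List Int)) (rest : List Int) : List (List Int) :=
  if h : (0:Int) ∈ rest then
    altLoop (routes ++ [PySem.List.slice rest none (some (((PySem.List.index? rest 0).getD 0 : Nat) : Int))])
            (PySem.List.slice rest (some ((((PySem.List.index? rest 0).getD 0 : Nat) : Int) + 1)) none)
  else routes
termination_by rest.length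
decreasing_by exact pvSliceShrink rest _ h

def reconstruct_routes_alt (flat_offspring : List Int) : List (List Int) :=
  altLoop [] flat_offspring

-- ===== PRECONDITION & SPEC =====
def Spec_reconstruct_routes (flat_offspring : List Int) (out : List (List Int)) : Prop := out = reconstruct_routes_alt flat_offspring
instance (flat_offspring : List Int) (out : List (List Int)) : Decidable (Spec_reconstruct_routes flat_offspring out) := by unfold Spec_reconstruct_routes; infer_instance

-- ===== CLAIM (what is proved, stated in full; the proofs are below) =====
def Claim_equal_reconstruct_routes : Prop := ∀ (flat_offspring : List Int), Dom_reconstruct_routes flat_offspring → Spec_reconstruct_routes flat_offspring (reconstruct_routes flat_offspring)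

-- ===== LEMMAS AND PROOFS =====

-- A's fold over a zero-free list only extends the current route
theorem foldA_no_zero (xs : List Int) (acc : List (List Int)) (cur : List Int)
    (h : (0:Int) ∉ xs) : List.foldl aStep (acc, cur) xs = (acc, cur ++ xs) := by
  induction xs generalizing cur with
  | nil => simp
  | cons x t ih =>
      have hx : x ≠ 0 := by intro hx; exact h (hx ▸ List.mem_cons_self)
      have ht : (0:Int) ∉ t := fun hm => h (List.mem_cons_of_mem _ hm)
      simp [aStep, hx, ih _ ht]

-- the finished-routes accumulator factors out of A's fold
theorem foldA_acc (xs : List Int) (acc : List (List Int)) (cur : List Int) :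
    (List.foldl aStep (acc, cur) xs).1 = acc ++ (List.foldl aStep ([], cur) xs).1 := by
  induction xs generalizing acc cur with
  | nil => simp
  | cons x t ih =>
      by_cases hx : x = 0
      · subst hx
        simp only [List.foldl_cons, aStep, reduceIte, List.nil_append]
        rw [ih (acc ++ [cur]) [], ih [cur] []]
        simp
      · simp only [List.foldl_cons, aStep, if_neg hx]
        exact ih acc (cur ++ [x])

-- the routes accumulator factors out of B's loop
theorem altLoop_acc (rest : List Int) (routes : List (List Int)) :
    altLoop routes rest = routes ++ altLoop [] rest := by
  induction hn : rest.length using Nat.strong_induction_on generalizing rest routes with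
  | _ n ih =>
    by_cases h : (0:Int) ∈ rest
    · conv_lhs => rw [altLoop]
      conv_rhs => rw [altLoop]
      rw [dif_pos h, dif_pos h]
      subst hn
      simp only [List.nil_append]
      rw [ih _ (pvSliceShrink rest _ h) _ _ rfl,
          ih _ (pvSliceShrink rest _ h) _ ([PySem.List.slice rest none (some (((PySem.List.index? rest 0).getD 0 : Nat) : Int))]) rfl]
      simp
    · conv_lhs => rw [altLoop]
      conv_rhs => rw [altLoop]
      rw [dif_neg h, dif_neg h]; simp

theorem main_eq (xs : List Int) : reconstruct_routes xs = reconstruct_routes_alt xs := by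
  induction hn : xs.length using Nat.strong_induction_on generalizing xs with
  | _ n ih =>
    by_cases h : (0:Int) ∈ xs
    · -- first zero at position k: xs = pre ++ 0 :: suf, 0 ∉ pre, pre.length = k
      obtain ⟨k, hk⟩ := (PySem.List.index?_isSome_iff (xs := xs) (v := 0)).mpr h |> Option.isSome_iff_exists.mp
      obtain ⟨pre, suf, hxs, hlen, hpre⟩ := (PySem.List.index?_eq_some_iff xs 0 k).mp hk
      -- A side
      have hA : reconstruct_routes xs = pre :: reconstruct_routes suf := by
        unfold reconstruct_routes
        rw [hxs, List.foldl_append, foldA_no_zero pre [] [] hpre]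
        simp only [List.nil_append, List.foldl_cons, aStep, reduceIte]
        rw [foldA_acc suf [pre] []]
        simp
      -- B side
      have hB : reconstruct_routes_alt xs = pre :: reconstruct_routes_alt suf := by
        unfold reconstruct_routes_alt
        conv_lhs => rw [altLoop]
        rw [dif_pos h]
        have hg : (PySem.List.index? xs 0).getD 0 = k := by rw [hk]; rfl
        have h1 : PySem.List.slice xs none (some ((((PySem.List.index? xs 0).getD 0 : Nat)) : Int)) = pre := by
          rw [hg, PySem.List.slice_to_natCast, hxs, ← hlen, List.take_left]
        have h2 : PySem.List.slice xs (some (((((PySem.List.index? xs 0).getD 0 : Nat)) : Int) + 1)) none = suf := by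
          have hc : (((k:Nat) : Int)) + 1 = (((k+1 : Nat) : Int)) := by push_cast; ring
          rw [hg, hc, PySem.List.slice_from_natCast, hxs, ← hlen]
          rw [show pre.length + 1 = (pre ++ [(0:Int)]).length by simp]
          rw [show pre ++ (0:Int) :: suf = (pre ++ [(0:Int)]) ++ suf by simp]
          exact List.drop_left
        simp only [List.nil_append]
        rw [h1, h2, altLoop_acc]
        rfl
      rw [hA, hB]
      have hsuf : suf.length < n := by
        subst hn; rw [hxs]; simp; omega
      rw [ih _ hsuf suf rfl]
    · -- no zero: A returns [], B's while loop never runs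
      unfold reconstruct_routes reconstruct_routes_alt
      conv_rhs => rw [altLoop]
      rw [(foldA_no_zero xs [] [] h), dif_neg h]

-- ===== VERDICT (by name: the statement is the Claim_ definition above) =====
theorem reconstruct_routes_spec : Claim_equal_reconstruct_routes := by
  intro xs _
  unfold Spec_reconstruct_routes
  exact main_eq xs
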